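-- pv_equiv track=rewrite | github.com/norminton/tenax | tenax/banner.py | _make_canvas
-- ===== SOURCE A (Python) =====
-- def _make_canvas(lines: list[str], pad_x: int = 8, pad_y: int = 4) -> tuple[list[list[str]], int, int]:
--     height = len(lines) + (pad_y * 2)
--     width = max((len(line) for line in lines), default=0) + (pad_x * 2)
--
--     canvas = [[" " for _ in range(width)] for _ in range(height)]
--
--     for y, line in enumerate(lines, start=pad_y):
--         for x, ch in enumerate(line, start=pad_x):
--             canvas[y][x] = ch
--
--     return canvas, width, height
-- ===== SOURCE B (Python) =====
-- def _make_canvas(lines: list[str], pad_x: int = 8, pad_y: int = 4) -> tuple[list[list[str]], int, int]: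
--     maxlen = max(map(len, lines), default=0)
--     width = maxlen + 2 * pad_x
--     blank_row = [" "] * width
--     rows = [list(" " * pad_x + line + " " * (maxlen - len(line) + pad_x)) for line in lines]
--     canvas = [blank_row[:] for _ in range(pad_y)] + rows + [blank_row[:] for _ in range(pad_y)]
--     return canvas, width, len(lines) + 2 * pad_y
-- ===== Notes on version B (the rewrite author's own statement) =====
-- stated objective: simpler
-- what changed: B builds the canvas row by row by list concatenation (pad_y blank rows, each line as one padded character row, pad_y blank rows) instead of allocating a full space grid and then overwriting a sub-block cell by cell.
-- outside the precondition, e.g. on _make_canvas([''], 0, -1): A returns ([], 0, -1), B returns ([[]], 0, -1); on _make_canvas([''], -1, 0): A returns ([[]], -2, 1), B returns ([[]], -2, 1)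
import Mathlib
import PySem

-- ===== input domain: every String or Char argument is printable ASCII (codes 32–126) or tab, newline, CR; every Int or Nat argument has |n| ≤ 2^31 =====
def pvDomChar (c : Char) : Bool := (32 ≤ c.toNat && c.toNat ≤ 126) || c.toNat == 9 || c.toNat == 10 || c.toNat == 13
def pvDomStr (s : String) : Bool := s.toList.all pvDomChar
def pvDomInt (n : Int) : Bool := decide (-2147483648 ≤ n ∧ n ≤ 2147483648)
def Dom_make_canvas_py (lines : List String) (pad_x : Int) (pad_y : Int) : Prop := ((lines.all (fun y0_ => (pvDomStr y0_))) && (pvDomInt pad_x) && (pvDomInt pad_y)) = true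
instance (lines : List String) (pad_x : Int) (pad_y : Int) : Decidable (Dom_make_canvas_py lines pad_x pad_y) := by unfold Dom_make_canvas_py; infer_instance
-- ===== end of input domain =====

-- B builds the canvas row by row by concatenation instead of overwriting a pre-allocated space grid;
-- equivalence is proved for non-negative padding (A raises or wraps negative indices otherwise).

-- ===== PORT A =====
-- `xs[i] = v` on a list: negative index wraps; out of range would raise IndexError in Python
-- (such inputs are excluded by Pre_, where Python raises the port leaves the list unchanged).
def pySetRow (xs : List String) (i : Int) (v : String) : List String :=
  let n : Int := xs.length
  let j : Int := if i < 0 then i + n else i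
  if 0 ≤ j ∧ j < n then xs.set j.toNat v else xs

-- `canvas[y][x] = v`: index row y (Python wrap rule), assign cell x of that row.
def pySetCell (c : List (List String)) (y x : Int) (v : String) : List (List String) :=
  let n : Int := c.length
  let j : Int := if y < 0 then y + n else y
  if 0 ≤ j ∧ j < n then c.set j.toNat (pySetRow (c.getD j.toNat []) x v) else c

def make_canvas_py (lines : List String) (pad_x : Int) (pad_y : Int) : List (List String) × Int × Int :=
  let height : Int := (lines.length : Int) + pad_y * 2
  -- max((len(line) for line in lines), default=0): all lengths are ≥ 0, so fold max from 0
  let width : Int := (lines.map (fun l => (l.toList.length : Int))).foldl max 0 + pad_x * 2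
  -- [[" " for _ in range(width)] for _ in range(height)]: range(k) iterates max(k,0) times
  let canvas0 : List (List String) := List.replicate height.toNat (List.replicate width.toNat " ")
  -- for y, line in enumerate(lines, start=pad_y): for x, ch in enumerate(line, start=pad_x): canvas[y][x] = ch
  let canvas := lines.zipIdx.foldl (fun c p =>
      (p.1.toList.zipIdx.foldl (fun c2 q =>
        pySetCell c2 (pad_y + (p.2 : Int)) (pad_x + (q.2 : Int)) (String.ofList [q.1])) c)) canvas0
  (canvas, width, height)

-- ===== PORT B =====
def make_canvas_py_alt (lines : List String) (pad_x : Int) (pad_y : Int) : List (List String) × Int × Int :=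
  let maxlen : Int := (lines.map (fun l => (l.toList.length : Int))).foldl max 0
  let width : Int := maxlen + 2 * pad_x
  let blank_row : List String := List.replicate width.toNat " "
  -- [list(" "*pad_x + line + " "*(maxlen - len(line) + pad_x)) for line in lines]
  let rows : List (List String) := lines.map (fun line =>
      (List.replicate pad_x.toNat ' ' ++ line.toList
        ++ List.replicate (maxlen - (line.toList.length : Int) + pad_x).toNat ' ').map
        (fun c => String.ofList [c]))
  (List.replicate pad_y.toNat blank_row ++ rows ++ List.replicate pad_y.toNat blank_row,
   width, (lines.length : Int) + 2 * pad_y)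

-- ===== PRECONDITION & SPEC =====
-- Pre_ excludes negative padding: there A either raises IndexError or silently writes characters
-- through Python's negative-index wraparound into accidental rows (on degenerate all-empty inputs
-- A happens to return a value B also produces).
def Pre_make_canvas_py (lines : List String) (pad_x : Int) (pad_y : Int) : Prop :=
  0 ≤ pad_x ∧ 0 ≤ pad_y
instance (lines : List String) (pad_x : Int) (pad_y : Int) : Decidable (Pre_make_canvas_py lines pad_x pad_y) := by unfold Pre_make_canvas_py; infer_instance

def pvWitness_make_canvas_py : List String × Int × Int := (["ab", "c"], 1, 1)

def Spec_make_canvas_py (lines : List String) (pad_x : Int) (pad_y : Int) (out : List (List String) × Int × Int) : Prop := out = make_canvas_py_alt lines pad_x pad_y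
instance (lines : List String) (pad_x : Int) (pad_y : Int) (out : List (List String) × Int × Int) : Decidable (Spec_make_canvas_py lines pad_x pad_y out) := by unfold Spec_make_canvas_py; infer_instance

-- ===== CLAIM (what is proved, stated in full; the proofs are below) =====
def Claim_equal_make_canvas_py : Prop := ∀ (lines : List String) (pad_x : Int) (pad_y : Int), Dom_make_canvas_py lines pad_x pad_y → Pre_make_canvas_py lines pad_x pad_y → Spec_make_canvas_py lines pad_x pad_y (make_canvas_py lines pad_x pad_y)

-- ===== LEMMAS AND PROOFS =====

-- fold max over the casted lengths agrees with the Nat fold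
lemma pv_foldl_max_cast (ls : List String) (a : Nat) :
    (ls.map (fun l => (l.toList.length : Int))).foldl max (a : Int)
      = ((ls.map (fun l => l.toList.length)).foldl max a : Nat) := by
  induction ls generalizing a with
  | nil => rfl
  | cons b t ih =>
    rw [List.map_cons, List.map_cons, List.foldl_cons, List.foldl_cons, ← Nat.cast_max, ih]

-- the inner loop writes line's characters into row r at positions s+n, s+n+1, …
lemma pv_rowFold (s : Nat) : ∀ (l : List Char) (n : Nat) (r : List String),
    s + n + l.length ≤ r.length →
    (l.zipIdx n).foldl (fun c2 q => pySetRow c2 ((s : Int) + (q.2 : Int)) (String.ofList [q.1])) r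
      = r.take (s + n) ++ l.map (fun c => String.ofList [c]) ++ r.drop (s + n + l.length) := by
  intro l
  induction l with
  | nil => intro n r _; simp
  | cons a t ih =>
    intro n r hlen
    rw [List.zipIdx_cons, List.foldl_cons]
    have hm : s + n < r.length := by simp at hlen; omega
    have hset : pySetRow r ((s : Int) + (n : Int)) (String.ofList [a]) = r.set (s + n) (String.ofList [a]) := by
      simp only [pySetRow]
      rw [if_neg (by omega : ¬ ((s : Int) + (n : Int) < 0)),
          if_pos (⟨by omega, by omega⟩ : (0 : Int) ≤ (s : Int) + (n : Int) ∧ (s : Int) + (n : Int) < (r.length : Int)),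
          (by omega : ((s : Int) + (n : Int)).toNat = s + n)]
    rw [hset, ih (n + 1) _ (by simp only [List.length_set, List.length_cons] at hlen ⊢; omega)]
    have htake : (r.set (s + n) (String.ofList [a])).take (s + n + 1) = r.take (s + n) ++ [String.ofList [a]] := by
      rw [List.set_eq_take_append_cons_drop, if_pos hm, List.take_append]
      simp [List.length_take, Nat.min_eq_left (Nat.le_of_lt hm), List.take_of_length_le]
    have e1 : s + (n + 1) = s + n + 1 := by omega
    have e2 : s + (n + 1) + t.length = s + n + (a :: t).length := by simp; omega
    rw [e2, e1, htake, List.drop_set_of_lt (by simp only [List.length_cons]; omega)]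
    simp

-- the inner loop over the canvas only rewrites row y
lemma pv_cellFold (px : Nat) (y : Int) (hy : 0 ≤ y) : ∀ (l : List Char) (n : Nat) (c : List (List String)),
    y.toNat < c.length →
    (l.zipIdx n).foldl (fun c2 q => pySetCell c2 y ((px : Int) + (q.2 : Int)) (String.ofList [q.1])) c
      = c.set y.toNat ((l.zipIdx n).foldl (fun r q => pySetRow r ((px : Int) + (q.2 : Int)) (String.ofList [q.1])) (c.getD y.toNat [])) := by
  intro l
  induction l with
  | nil =>
    intro n c hc
    rw [List.zipIdx_nil, List.foldl_nil, List.foldl_nil,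
        List.getD_eq_getElem c [] hc, List.set_getElem_self]
  | cons a t ih =>
    intro n c hc
    rw [List.zipIdx_cons, List.foldl_cons, List.foldl_cons]
    have hin : (0 : Int) ≤ y ∧ y < (c.length : Int) := ⟨hy, by omega⟩
    have hcell : pySetCell c y ((px : Int) + (n : Int)) (String.ofList [a])
        = c.set y.toNat (pySetRow (c.getD y.toNat []) ((px : Int) + (n : Int)) (String.ofList [a])) := by
      simp only [pySetCell]
      rw [if_neg (by omega : ¬ (y < 0)), if_pos hin]
    rw [hcell, ih (n + 1) _ (by simp; omega)]
    rw [List.set_set]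
    congr 1
    rw [List.getD_eq_getElem _ [] (by simp; omega), List.getElem_set_self,
        List.getD_eq_getElem c [] hc]

-- row produced from a blank row of width M + 2*px
lemma pv_rowBlank (px M : Nat) (l : List Char) (hl : l.length ≤ M) :
    (l.zipIdx 0).foldl (fun r q => pySetRow r ((px : Int) + (q.2 : Int)) (String.ofList [q.1]))
      (List.replicate (M + 2 * px) " ")
      = List.replicate px " " ++ l.map (fun c => String.ofList [c]) ++ List.replicate (M - l.length + px) " " := by
  rw [pv_rowFold px l 0 _ (by simp; omega), List.take_replicate, List.drop_replicate]
  have h1 : min (px + 0) (M + 2 * px) = px := by omega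
  have h2 : M + 2 * px - (px + 0 + l.length) = M - l.length + px := by omega
  rw [h1, h2]

-- the outer loop turns the blank block after pre into the padded line rows
lemma pv_outerFold (px py M : Nat) :
    ∀ (ls : List String) (n : Nat) (pre : List (List String)),
    pre.length = py + n → (∀ l ∈ ls, l.toList.length ≤ M) →
    (ls.zipIdx n).foldl (fun c p =>
        (p.1.toList.zipIdx.foldl (fun c2 q =>
          pySetCell c2 ((py : Int) + (p.2 : Int)) ((px : Int) + (q.2 : Int)) (String.ofList [q.1])) c))
      (pre ++ List.replicate (ls.length + py) (List.replicate (M + 2 * px) " "))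
      = pre ++ ls.map (fun line =>
          List.replicate px " " ++ line.toList.map (fun c => String.ofList [c])
            ++ List.replicate (M - line.toList.length + px) " ")
        ++ List.replicate py (List.replicate (M + 2 * px) " ") := by
  intro ls
  induction ls with
  | nil => intro n pre _ _; simp
  | cons a t ih =>
    intro n pre hpre hlen
    rw [List.zipIdx_cons, List.foldl_cons]
    have hy : (0 : Int) ≤ (py : Int) + (n : Int) := by omega
    have hrep : List.replicate ((a :: t).length + py) (List.replicate (M + 2 * px) " ")
        = List.replicate (M + 2 * px) " " :: List.replicate (t.length + py) (List.replicate (M + 2 * px) " ") := by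
      simp [List.length_cons]
      rw [show t.length + 1 + py = (t.length + py) + 1 by omega, List.replicate_succ]
    rw [hrep]
    have htoNat : ((py : Int) + (n : Int)).toNat = py + n := by omega
    have hc : ((py : Int) + (n : Int)).toNat
        < (pre ++ List.replicate (M + 2 * px) " " :: List.replicate (t.length + py) (List.replicate (M + 2 * px) " ")).length := by
      simp [htoNat]; omega
    rw [pv_cellFold px ((py : Int) + (n : Int)) hy a.toList 0 _ hc]
    have hget : (pre ++ List.replicate (M + 2 * px) " " :: List.replicate (t.length + py) (List.replicate (M + 2 * px) " ")).getD ((py : Int) + (n : Int)).toNat []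
        = List.replicate (M + 2 * px) " " := by
      rw [List.getD_eq_getElem _ [] hc,
          List.getElem_append_right (by omega : pre.length ≤ ((py : Int) + (n : Int)).toNat)]
      simp [htoNat, hpre]
    rw [hget, pv_rowBlank px M a.toList (hlen a (by simp))]
    have hset : (pre ++ List.replicate (M + 2 * px) " " :: List.replicate (t.length + py) (List.replicate (M + 2 * px) " ")).set ((py : Int) + (n : Int)).toNat
          (List.replicate px " " ++ a.toList.map (fun c => String.ofList [c]) ++ List.replicate (M - a.toList.length + px) " ")
        = (pre ++ [List.replicate px " " ++ a.toList.map (fun c => String.ofList [c]) ++ List.replicate (M - a.toList.length + px) " "])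
          ++ List.replicate (t.length + py) (List.replicate (M + 2 * px) " ") := by
      rw [htoNat, List.set_append, if_neg (by omega), ← hpre]
      simp
    rw [hset, ih (n + 1) _ (by simp [hpre]; omega) (fun l hl => hlen l (by simp [hl]))]
    simp

-- ===== VERDICT (by name: the statement is the Claim_ definition above) =====
theorem make_canvas_py_spec : Claim_equal_make_canvas_py := by
  intro lines pad_x pad_y _ hpre
  obtain ⟨hx, hy⟩ := hpre
  lift pad_x to ℕ using hx with px
  lift pad_y to ℕ using hy with py
  show make_canvas_py lines (px : Int) (py : Int) = make_canvas_py_alt lines (px : Int) (py : Int)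
  have hmax : (lines.map (fun l => (l.toList.length : Int))).foldl max 0
      = (((lines.map (fun l => l.toList.length)).foldl max 0 : Nat) : Int) := by
    simpa using pv_foldl_max_cast lines 0
  have hbound : ∀ l ∈ lines, l.toList.length
      ≤ (lines.map (fun l => l.toList.length)).foldl max 0 := by
    intro l hl
    exact (PySem.List.le_foldl_max _ 0).2 _ (List.mem_map_of_mem hl)
  set M : ℕ := (lines.map (fun l => l.toList.length)).foldl max 0 with hMdef
  simp only [make_canvas_py, make_canvas_py_alt, hmax]
  have hW : (((M : Int) + (px : Int) * 2)).toNat = M + 2 * px := by omega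
  have hW' : (((M : Int) + 2 * (px : Int))).toNat = M + 2 * px := by omega
  have hH : (((lines.length : Nat) : Int) + (py : Int) * 2).toNat = py + (lines.length + py) := by omega
  have hPyN : ((py : Int)).toNat = py := by omega
  have hPxN : ((px : Int)).toNat = px := by omega
  rw [hW, hW', hH, hPyN, List.replicate_add,
      pv_outerFold px py M lines 0 (List.replicate py (List.replicate (M + 2 * px) " "))
        (by simp) hbound]
  have hrows : lines.map (fun line =>
        (List.replicate ((px : Int)).toNat ' ' ++ line.toList
          ++ List.replicate ((M : Int) - (line.toList.length : Int) + (px : Int)).toNat ' ').map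
          (fun c => String.ofList [c]))
      = lines.map (fun line =>
          List.replicate px " " ++ line.toList.map (fun c => String.ofList [c])
            ++ List.replicate (M - line.toList.length + px) " ") := by
    refine List.map_eq_map_iff.mpr (fun l hl => ?_)
    have hlM : l.toList.length ≤ M := hbound l hl
    have hT : ((M : Int) - (l.toList.length : Int) + (px : Int)).toNat
        = M - l.toList.length + px := by omega
    rw [hPxN, hT, List.map_append, List.map_append, List.map_replicate, List.map_replicate]
  rw [hrows, Prod.mk.injEq, Prod.mk.injEq]
  refine ⟨rfl, by ring, by ring⟩
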